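-- pv_equiv track=rewrite | github.com/pypi-data/pypi-mirror-400 | packages/thailint/thailint-0.15.0-py3-none-any.whl/src/linters/file_header/bash_parser.py | _skip_preamble
-- ===== SOURCE A (Python) =====
-- def _skip_preamble(lines: list[str]) -> list[str]:  # thailint: ignore[nesting]
--     """Skip shebang and leading empty lines."""
--     result = []
--     skipping = True
--     for line in lines:
--         stripped = line.strip()
--         if skipping:
--             if stripped.startswith("#!") or not stripped:
--                 continue
--             skipping = False
--         result.append(stripped)
--     return result
-- ===== SOURCE B (Python) =====
-- def _skip_preamble(lines: list[str]) -> list[str]: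
--     """Skip shebang and leading empty lines (two-phase: find boundary, then slice+strip)."""
--     idx = len(lines)
--     for i, line in enumerate(lines):
--         s = line.strip()
--         if s and not s.startswith("#!"):
--             idx = i
--             break
--     return [line.strip() for line in lines[idx:]]
-- ===== Notes on version B (the rewrite author's own statement) =====
-- stated objective: alternative
-- what changed: Replaced the single flag-carrying filter pass with a two-phase decomposition: first find the boundary index of the first non-blank, non-shebang stripped line, then return the strip-mapped slice from that index.
import Mathlib
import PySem

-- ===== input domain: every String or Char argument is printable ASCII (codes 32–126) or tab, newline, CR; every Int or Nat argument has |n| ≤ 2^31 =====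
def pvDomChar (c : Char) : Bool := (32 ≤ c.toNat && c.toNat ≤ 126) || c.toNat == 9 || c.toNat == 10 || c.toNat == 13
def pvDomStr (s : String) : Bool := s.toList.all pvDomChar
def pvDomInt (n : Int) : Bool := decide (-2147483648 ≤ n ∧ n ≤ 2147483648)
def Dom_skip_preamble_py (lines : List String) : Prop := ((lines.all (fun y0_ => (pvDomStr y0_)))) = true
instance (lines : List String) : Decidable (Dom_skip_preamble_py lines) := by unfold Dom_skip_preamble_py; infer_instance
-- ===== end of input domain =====

-- B replaces A's flag-carrying single filter pass with a two-phase decomposition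
-- (find the boundary index, then strip-map the suffix); alternative, same cost.


-- ===== PORT A =====
-- A's loop body: state is (result, skipping); branches in A's order
def stepA (st : List String × Bool) (line : String) : List String × Bool :=
  let stripped := PySem.Str.strip line
  if st.2 then
    if PySem.Str.startswith stripped "#!" || stripped == "" then st
    else (st.1 ++ [stripped], false)
  else (st.1 ++ [stripped], st.2)

def skip_preamble_py (lines : List String) : List String :=
  (lines.foldl stepA ([], true)).1

-- ===== PORT B =====
-- boundary-finding phase: index of the first line whose stripped form is
-- non-empty and does not start with "#!" (list length if none)
def skipBoundary : List String → Nat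
  | [] => 0
  | l :: ls =>
    let s := PySem.Str.strip l
    if s != "" && !(PySem.Str.startswith s "#!") then 0 else skipBoundary ls + 1

-- slice-and-map phase: lines[idx:] stripped (idx is a Nat index ≤ len, so lines[idx:] = drop idx)
def skip_preamble_py_alt (lines : List String) : List String :=
  (lines.drop (skipBoundary lines)).map PySem.Str.strip

-- ===== PRECONDITION & SPEC =====
def Spec_skip_preamble_py (lines : List String) (out : List String) : Prop := out = skip_preamble_py_alt lines
instance (lines : List String) (out : List String) : Decidable (Spec_skip_preamble_py lines out) := by unfold Spec_skip_preamble_py; infer_instance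

-- ===== CLAIM (what is proved, stated in full; the proofs are below) =====
def Claim_equal_skip_preamble_py : Prop := ∀ (lines : List String), Dom_skip_preamble_py lines → Spec_skip_preamble_py lines (skip_preamble_py lines)

-- ===== LEMMAS AND PROOFS =====

-- once skipping is false, A's loop appends the stripped form of every remaining line
theorem foldA_false (ls : List String) (acc : List String) :
    ls.foldl stepA (acc, false) = (acc ++ ls.map PySem.Str.strip, false) := by
  induction ls generalizing acc with
  | nil => simp
  | cons l ls ih =>
    rw [List.foldl_cons, show stepA (acc, false) l = (acc ++ [PySem.Str.strip l], false) from rfl, ih]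
    simp

-- while skipping is true, A's loop computes acc ++ B's answer for the remaining lines
theorem foldA_true (ls : List String) (acc : List String) :
    (ls.foldl stepA (acc, true)).1 = acc ++ skip_preamble_py_alt ls := by
  induction ls generalizing acc with
  | nil => simp [skip_preamble_py_alt, skipBoundary]
  | cons l ls ih =>
    rw [List.foldl_cons]
    by_cases hsw : PySem.Str.startswith (PySem.Str.strip l) "#!" = true
    · have hsw' : PySem.Chars.startswith (PySem.Chars.strip l.toList) ['#', '!'] = true := by
        simpa using hsw
      rw [show stepA (acc, true) l = (acc, true) from by simp [stepA, hsw'], ih]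
      simp [skip_preamble_py_alt, skipBoundary, hsw']
    · have hsw' : PySem.Chars.startswith (PySem.Chars.strip l.toList) ['#', '!'] = false := by
        rw [Bool.not_eq_true] at hsw; simpa using hsw
      by_cases hemp : PySem.Str.strip l = ""
      · rw [show stepA (acc, true) l = (acc, true) from by simp [stepA, hemp], ih]
        simp [skip_preamble_py_alt, skipBoundary, hemp]
      · rw [show stepA (acc, true) l = (acc ++ [PySem.Str.strip l], false) from by
            simp [stepA, hsw', hemp], foldA_false]
        simp [skip_preamble_py_alt, skipBoundary, hemp, hsw']

-- ===== VERDICT (by name: the statement is the Claim_ definition above) =====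
theorem skip_preamble_py_spec : Claim_equal_skip_preamble_py := by
  intro lines _
  show skip_preamble_py lines = skip_preamble_py_alt lines
  simpa [skip_preamble_py] using foldA_true lines []
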